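-- pv_equiv track=rewrite | github.com/Kinetics20/Python_practice_sessions_05 | Unit_tests/codewars_functions_.py | find_longest
-- ===== SOURCE A (Python) =====
-- def find_longest(arr):
--     max_length = 0
--     max_number = None
--     for num in arr:
--         length = len(str(num))
--         if length > max_length:
--             max_length = length
--             max_number = num
--     return max_number
-- ===== SOURCE B (Python) =====
-- def find_longest(arr):
--     if not arr:
--         return None
--     m = max(len(str(n)) for n in arr)
--     return next(n for n in arr if len(str(n)) == m)
-- ===== Notes on version B (the rewrite author's own statement) =====
-- stated objective: simpler
-- what changed: Replaces the single running-max loop with running state by a compute-then-find decomposition: take the maximum digit-length in one pass, then return the first element attaining it.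
import Mathlib
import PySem

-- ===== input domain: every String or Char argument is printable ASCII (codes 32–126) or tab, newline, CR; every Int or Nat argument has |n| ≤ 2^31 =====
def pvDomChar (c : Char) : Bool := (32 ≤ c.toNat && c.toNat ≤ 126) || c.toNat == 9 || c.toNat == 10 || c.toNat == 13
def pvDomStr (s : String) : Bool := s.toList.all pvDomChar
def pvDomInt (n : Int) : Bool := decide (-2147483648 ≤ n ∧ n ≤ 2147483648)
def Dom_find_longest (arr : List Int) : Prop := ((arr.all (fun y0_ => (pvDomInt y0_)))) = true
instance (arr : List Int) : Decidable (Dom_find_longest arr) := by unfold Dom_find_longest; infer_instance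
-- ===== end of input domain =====

-- B replaces A's running-max loop by a two-pass compute-the-max-then-find-first decomposition (objective: simpler).

-- ===== PORT A =====
-- len(str(num)) as a Nat (PySem.Int.toChars = str(n) on the List Char side)
def pvStrLen (n : Int) : Nat := (PySem.Int.toChars n).length

def find_longest (arr : List Int) : Option Int :=
  (arr.foldl
    (fun (st : Nat × Option Int) num =>
      let length := pvStrLen num
      if length > st.1 then (length, some num) else st)
    (0, none)).2

-- ===== PORT B =====
def find_longest_alt (arr : List Int) : Option Int :=
  if arr = [] then none
  else
    match PySem.List.max? (arr.map pvStrLen) (fun x => x) with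
    | none => none
    | some m => arr.find? (fun n => pvStrLen n == m)

-- ===== PRECONDITION & SPEC =====
def Spec_find_longest (arr : List Int) (out : Option Int) : Prop := out = find_longest_alt arr
instance (arr : List Int) (out : Option Int) : Decidable (Spec_find_longest arr out) := by unfold Spec_find_longest; infer_instance

-- ===== CLAIM (what is proved, stated in full; the proofs are below) =====
def Claim_equal_find_longest : Prop := ∀ (arr : List Int), Dom_find_longest arr → Spec_find_longest arr (find_longest arr)

-- ===== LEMMAS AND PROOFS =====

theorem pvStrLen_pos (n : Int) : 0 < pvStrLen n := by
  unfold pvStrLen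
  simp only [PySem.Int.toChars]
  split
  · simp
  · exact Nat.length_toDigits_pos

-- foldl max with an arbitrary seed, in terms of the 0-seeded fold
theorem foldl_max_seed (t : List Nat) : ∀ x : Nat, t.foldl max x = max x (t.foldl max 0) := by
  induction t with
  | nil => intro x; simp
  | cons a t ih =>
    intro x
    simp only [List.foldl_cons]
    rw [ih (max x a), ih (max 0 a)]
    simp


-- characterisation of A's loop: it returns the first element attaining the max length,
-- provided some element exceeds the seed length; otherwise the seed candidate.
theorem loopA_eq (arr : List Int) : ∀ (ml : Nat) (mn : Option Int),
    (arr.foldl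
      (fun (st : Nat × Option Int) num =>
        let length := pvStrLen num
        if length > st.1 then (length, some num) else st)
      (ml, mn)).2 =
    if ml < (arr.map pvStrLen).foldl max 0 then
      arr.find? (fun n => pvStrLen n == (arr.map pvStrLen).foldl max 0)
    else mn := by
  induction arr with
  | nil => intro ml mn; simp
  | cons n t ih =>
    intro ml mn
    have hM : ((n :: t).map pvStrLen).foldl max 0
        = max (pvStrLen n) ((t.map pvStrLen).foldl max 0) := by
      simp only [List.map_cons, List.foldl_cons]
      rw [foldl_max_seed]
      simp
    simp only [List.foldl_cons]
    by_cases h : pvStrLen n > ml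
    · rw [if_pos h, ih]
      by_cases h2 : pvStrLen n < (t.map pvStrLen).foldl max 0
      · rw [if_pos h2, hM]
        have hmax : max (pvStrLen n) ((t.map pvStrLen).foldl max 0)
            = (t.map pvStrLen).foldl max 0 := by omega
        rw [hmax, if_pos (by omega), List.find?_cons]
        have : (pvStrLen n == (t.map pvStrLen).foldl max 0) = false := by
          simp; omega
        rw [this]
      · rw [if_neg h2, hM]
        have hmax : max (pvStrLen n) ((t.map pvStrLen).foldl max 0) = pvStrLen n := by omega
        rw [hmax, if_pos (by omega), List.find?_cons]
        simp
    · rw [if_neg h, ih, hM]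
      by_cases h2 : ml < (t.map pvStrLen).foldl max 0
      · have hmax : max (pvStrLen n) ((t.map pvStrLen).foldl max 0)
            = (t.map pvStrLen).foldl max 0 := by omega
        rw [hmax, if_pos h2, if_pos h2, List.find?_cons]
        have : (pvStrLen n == (t.map pvStrLen).foldl max 0) = false := by
          simp; omega
        rw [this]
      · have : ¬ ml < max (pvStrLen n) ((t.map pvStrLen).foldl max 0) := by omega
        rw [if_neg this, if_neg h2]

-- ===== VERDICT (by name: the statement is the Claim_ definition above) =====
theorem find_longest_spec : Claim_equal_find_longest := by
  intro arr _
  unfold Spec_find_longest find_longest find_longest_alt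
  cases arr with
  | nil => simp
  | cons n t =>
    rw [loopA_eq]
    have hpos : 0 < ((n :: t).map pvStrLen).foldl max 0 := by
      have h1 := pvStrLen_pos n
      simp only [List.map_cons, List.foldl_cons]
      rw [foldl_max_seed]
      omega
    rw [if_pos hpos, if_neg (by simp)]
    have : (n :: t).map pvStrLen = pvStrLen n :: t.map pvStrLen := by simp
    rw [this, PySem.List.max?_id_cons]
    have : (t.map pvStrLen).foldl max (pvStrLen n)
        = ((n :: t).map pvStrLen).foldl max 0 := by
      simp only [List.map_cons, List.foldl_cons]
      rw [foldl_max_seed, foldl_max_seed (t.map pvStrLen) (max 0 (pvStrLen n))]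
      simp
    rw [this]
    simp only [List.map_cons]
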